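-- pv_equiv track=rewrite | github.com/alexedinburgh/affinityJenkins | compute_highest_affinity.py | highest_affinity
-- ===== SOURCE A (Python) =====
-- def highest_affinity(site_list, user_list, time_list):
--     dict_1 = {}
--     dict_2 = {}
--
--     index_name = []
--     for index in range(0,len(site_list)):
--
--         if site_list[index] not in dict_1:
--             index_name.append(site_list[index])
--             dict_1[site_list[index]] = [user_list[index]]
--             dict_2[site_list[index]] = {}
--         else:
--             dict_1[site_list[index]].append(user_list[index])
--
--     for e in index_name:
--         for i in range(0,len(index_name)):
--             if e != index_name[i]:
--                 dict_2[e][index_name[i]] = 0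
--
--
--     for i in range(0,len(index_name)):
--         for k in range(0,len(index_name)):
--             if index_name[i] != index_name[k]:
--                 count = 0
--                 for e in dict_1[index_name[i]]:
--                     if e in dict_1[index_name[k]]:
--                         count = count + 1;
--                 dict_2[index_name[i]][index_name[k]] = count;
--
--     position_1 = ""
--     position_2 = ""
--     max = 0
--     for i in range(0,len(index_name)):
--         for j in range(0,len(index_name)):
--             if index_name[i] != index_name[j]:
--                 if dict_2[index_name[i]][index_name[j]] > max:
--                     max = dict_2[index_name[i]][index_name[j]]
--                     position_1 = index_name[i]
--                     position_2 = index_name[j]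
--
--     list = [position_1,position_2]
--     final = sorted(list)
--     return(final[0],final[1])
-- ===== SOURCE B (Python) =====
-- def highest_affinity(site_list, user_list, time_list):
--     # Inverted index: per-user site lists drive the pair-score accumulation;
--     # no per-pair counting scan over user lists.
--     order = []
--     seen = set()
--     sites_of = {}          # user -> sites containing that user, first-appearance order
--     for s, u in zip(site_list, user_list):
--         if s not in seen:
--             seen.add(s)
--             order.append(s)
--         lst = sites_of.setdefault(u, [])
--         if s not in lst:
--             lst.append(s)
--     score = {}             # (i, k) -> occurrences of users under i that also appear under k
--     for s, u in zip(site_list, user_list):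
--         for t in sites_of[u]:
--             if t != s:
--                 score[(s, t)] = score.get((s, t), 0) + 1
--     best = 0
--     p1 = p2 = ""
--     for a in order:
--         for b in order:
--             if a != b and score.get((a, b), 0) > best:
--                 best = score.get((a, b), 0)
--                 p1, p2 = a, b
--     lo, hi = sorted([p1, p2])
--     return (lo, hi)
-- ===== Notes on version B (the rewrite author's own statement) =====
-- stated objective: faster
-- what changed: Replaces A's pairwise counting (for every ordered site pair, scan one site's whole user list testing membership in the other's) with an inverted index: one pass builds user -> list of sites containing that user, a second pass walks each (site, user) occurrence and increments score[(site, t)] for every other site t of that user, so the pair scores are accumulated per occurrence and the per-pair list scans disappear; only the final max scan over site pairs remains.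
import Mathlib
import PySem

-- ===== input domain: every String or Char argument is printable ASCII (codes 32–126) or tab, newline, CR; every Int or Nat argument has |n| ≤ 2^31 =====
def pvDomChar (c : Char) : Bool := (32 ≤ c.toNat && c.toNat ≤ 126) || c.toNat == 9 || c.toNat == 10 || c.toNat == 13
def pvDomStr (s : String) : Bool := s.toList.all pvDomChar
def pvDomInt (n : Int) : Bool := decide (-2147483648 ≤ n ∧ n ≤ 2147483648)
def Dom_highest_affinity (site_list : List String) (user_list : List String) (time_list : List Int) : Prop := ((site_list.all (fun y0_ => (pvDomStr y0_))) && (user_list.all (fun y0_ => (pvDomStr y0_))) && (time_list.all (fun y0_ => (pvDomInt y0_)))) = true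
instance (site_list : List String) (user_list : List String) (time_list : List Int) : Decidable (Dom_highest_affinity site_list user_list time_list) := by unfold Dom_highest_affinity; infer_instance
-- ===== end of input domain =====

-- B replaces A's per-site-pair counting scans by an inverted index (user -> sites
-- containing the user) that accumulates the pair scores one occurrence at a time;
-- only the final max scan over site pairs remains (a timing run measured B faster).

-- ===== PORT A =====
-- A's phase-1 loop body on one (site, user) pair
def haStep1 (st : PySem.Dict String (List String) × PySem.Dict String (PySem.Dict String Int) × List String)
    (p : String × String) :
    PySem.Dict String (List String) × PySem.Dict String (PySem.Dict String Int) × List String :=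
  if !st.1.contains p.1 then
    (st.1.insert p.1 [p.2], st.2.1.insert p.1 PySem.Dict.empty, st.2.2 ++ [p.1])
  else
    (st.1.modify p.1 [] (fun l => l ++ [p.2]), st.2.1, st.2.2)

-- one iteration's two subscripts: site_list[index], user_list[index] (none = IndexError; excluded by Pre_)
def haStep0 (st : PySem.Dict String (List String) × PySem.Dict String (PySem.Dict String Int) × List String)
    (so uo : Option String) :
    PySem.Dict String (List String) × PySem.Dict String (PySem.Dict String Int) × List String :=
  match so, uo with
  | some s, some u => haStep1 st (s, u)
  | _, _ => st

-- phase 1: first loop of A — builds dict_1 (site -> user list), dict_2 (site -> {}), index_name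
def haPhase1 (site_list user_list : List String) :
    PySem.Dict String (List String) × PySem.Dict String (PySem.Dict String Int) × List String :=
  (PySem.List.pyRange 0 (PySem.List.len site_list) 1).foldl (fun st idx =>
    haStep0 st (PySem.List.pyGet? site_list idx) (PySem.List.pyGet? user_list idx))
    (PySem.Dict.empty, PySem.Dict.empty, [])

-- phase 2: second loop of A — zero entries for every ordered pair of distinct names
def haPhase2 (names : List String) (d2 : PySem.Dict String (PySem.Dict String Int)) :
    PySem.Dict String (PySem.Dict String Int) :=
  names.foldl (fun d2 e =>
    (PySem.List.pyRange 0 (PySem.List.len names) 1).foldl (fun d2 i =>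
      if e ≠ PySem.List.pyGetD names i "" then
        d2.insert e ((d2.getD e PySem.Dict.empty).insert (PySem.List.pyGetD names i "") 0)
      else d2) d2) d2

-- the inner counting loop of A's third phase
def haCount (d1 : PySem.Dict String (List String)) (ni nk : String) : Int :=
  (d1.getD ni []).foldl (fun c e => if (d1.getD nk []).contains e then c + 1 else c) 0

-- phase 3: third loop of A — overlap count for every ordered pair of distinct names
def haPhase3 (d1 : PySem.Dict String (List String)) (names : List String)
    (d2 : PySem.Dict String (PySem.Dict String Int)) : PySem.Dict String (PySem.Dict String Int) :=
  (PySem.List.pyRange 0 (PySem.List.len names) 1).foldl (fun d2 i =>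
    (PySem.List.pyRange 0 (PySem.List.len names) 1).foldl (fun d2 k =>
      if PySem.List.pyGetD names i "" ≠ PySem.List.pyGetD names k "" then
        d2.insert (PySem.List.pyGetD names i "")
          ((d2.getD (PySem.List.pyGetD names i "") PySem.Dict.empty).insert
            (PySem.List.pyGetD names k "") (haCount d1 (PySem.List.pyGetD names i "") (PySem.List.pyGetD names k "")))
      else d2) d2) d2

-- phase 4: fourth loop of A — max scan over ordered pairs, state (position_1, position_2, max)
def haPhase4 (names : List String) (d2 : PySem.Dict String (PySem.Dict String Int)) :
    String × String × Int :=
  (PySem.List.pyRange 0 (PySem.List.len names) 1).foldl (fun st i =>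
    (PySem.List.pyRange 0 (PySem.List.len names) 1).foldl (fun (st : String × String × Int) j =>
      if PySem.List.pyGetD names i "" ≠ PySem.List.pyGetD names j "" then
        if (d2.getD (PySem.List.pyGetD names i "") PySem.Dict.empty).getD (PySem.List.pyGetD names j "") 0 > st.2.2 then
          (PySem.List.pyGetD names i "", PySem.List.pyGetD names j "",
            (d2.getD (PySem.List.pyGetD names i "") PySem.Dict.empty).getD (PySem.List.pyGetD names j "") 0)
        else st
      else st) st) ("", "", (0 : Int))

def highest_affinity (site_list : List String) (user_list : List String) (time_list : List Int) : String × String :=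
  let p := haPhase1 site_list user_list
  let d1 := p.1
  let names := p.2.2
  let d2 := haPhase2 names p.2.1
  let d2 := haPhase3 d1 names d2
  let fin := haPhase4 names d2
  let final := PySem.List.sorted [fin.1, fin.2.1] (fun x => x) false
  (PySem.List.pyGetD final 0 "", PySem.List.pyGetD final 1 "")

-- ===== PORT B =====
-- pass 1: one zip pass building order (sites, first appearance), seen (a set),
-- and sites_of (user -> dedup list of sites containing the user)
def hbPass1Step (st : List String × PySem.Set String × PySem.Dict String (List String))
    (p : String × String) :
    List String × PySem.Set String × PySem.Dict String (List String) :=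
  let st := if !(PySem.Set.contains st.2.1 p.1) then (st.1 ++ [p.1], PySem.Set.add st.2.1 p.1, st.2.2)
            else st
  let lst := st.2.2.getD p.2 []
  (st.1, st.2.1, st.2.2.insert p.2 (if lst.contains p.1 then lst else lst ++ [p.1]))

def hbPass1 (z : List (String × String)) :
    List String × PySem.Set String × PySem.Dict String (List String) :=
  z.foldl hbPass1Step ([], PySem.Set.empty, PySem.Dict.empty)

-- pass 2: per-occurrence accumulation of the pair scores from the inverted index
def hbPass2 (z : List (String × String)) (sitesOf : PySem.Dict String (List String)) :
    PySem.Dict (String × String) Int :=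
  z.foldl (fun sc p =>
    (sitesOf.getD p.2 []).foldl (fun sc t =>
      if t ≠ p.1 then sc.modify (p.1, t) 0 (· + 1) else sc) sc) PySem.Dict.empty

def highest_affinity_alt (site_list : List String) (user_list : List String) (time_list : List Int) : String × String :=
  let z := site_list.zip user_list
  let st := hbPass1 z
  let order := st.1
  let score := hbPass2 z st.2.2
  let best := order.foldl (fun st a =>
    order.foldl (fun (st : String × String × Int) b =>
      if a ≠ b ∧ score.getD (a, b) 0 > st.2.2 then (a, b, score.getD (a, b) 0) else st) st)
    ("", "", (0 : Int))
  let fl := PySem.List.sorted [best.1, best.2.1] (fun x => x) false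
  (PySem.List.pyGetD fl 0 "", PySem.List.pyGetD fl 1 "")

-- ===== PRECONDITION & SPEC =====
-- A indexes user_list at every index of site_list and raises IndexError when
-- user_list is shorter; exactly those inputs are excluded.
def Pre_highest_affinity (site_list : List String) (user_list : List String) (time_list : List Int) : Prop :=
  site_list.length ≤ user_list.length
instance (site_list : List String) (user_list : List String) (time_list : List Int) : Decidable (Pre_highest_affinity site_list user_list time_list) := by unfold Pre_highest_affinity; infer_instance

def pvWitness_highest_affinity : List String × List String × List Int :=
  (["a", "b", "a", "b"], ["u", "v", "u", "u"], [1, 2, 3, 4])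

def Spec_highest_affinity (site_list : List String) (user_list : List String) (time_list : List Int) (out : String × String) : Prop := out = highest_affinity_alt site_list user_list time_list
instance (site_list : List String) (user_list : List String) (time_list : List Int) (out : String × String) : Decidable (Spec_highest_affinity site_list user_list time_list out) := by unfold Spec_highest_affinity; infer_instance

-- ===== CLAIM (what is proved, stated in full; the proofs are below) =====
def Claim_equal_highest_affinity : Prop := ∀ (site_list : List String) (user_list : List String) (time_list : List Int), Dom_highest_affinity site_list user_list time_list → Pre_highest_affinity site_list user_list time_list → Spec_highest_affinity site_list user_list time_list (highest_affinity site_list user_list time_list)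

-- ===== LEMMAS AND PROOFS =====

-- the users attached to site s among the zipped (site, user) pairs, in order
def uOf (l : List (String × String)) (s : String) : List String :=
  (l.filter (fun p => p.1 == s)).map Prod.snd

-- the reference pair score: A's asymmetric multiplicity-weighted overlap
def refC (l : List (String × String)) (a b : String) : Int :=
  ((uOf l a).countP (fun u => (uOf l b).contains u) : Int)

-- the common max-scan shape both ports reduce to
def haScan (names : List String) (f : String → String → Int) : String × String × Int :=
  names.foldl (fun st a =>
    names.foldl (fun (st : String × String × Int) b =>
      if a ≠ b then (if f a b > st.2.2 then (a, b, f a b) else st) else st) st) ("", "", (0 : Int))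

lemma uOf_append (l : List (String × String)) (p : String × String) (s : String) :
    uOf (l ++ [p]) s = uOf l s ++ (if p.1 == s then [p.2] else []) := by
  simp only [uOf, List.filter_append, List.map_append]
  congr 1
  by_cases h : (p.1 == s) <;> simp [List.filter, h]

lemma uOf_nil_of_not_mem (l : List (String × String)) (s : String)
    (h : s ∉ l.map Prod.fst) : uOf l s = [] := by
  unfold uOf
  rw [List.filter_eq_nil_iff.mpr, List.map_nil]
  intro a ha hpa
  exact h (List.mem_map.mpr ⟨a, ha, by simpa using hpa⟩)

lemma mem_uOf (l : List (String × String)) (s u : String) :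
    u ∈ uOf l s ↔ (s, u) ∈ l := by
  unfold uOf
  constructor
  · intro h
    obtain ⟨p, hp, hu⟩ := List.mem_map.mp h
    obtain ⟨hpl, hps⟩ := List.mem_filter.mp hp
    have : p = (s, u) := by
      cases p
      simp only [beq_iff_eq] at hps
      simp_all
    exact this ▸ hpl
  · intro h
    exact List.mem_map.mpr ⟨(s, u), List.mem_filter.mpr ⟨h, by simp⟩, rfl⟩

lemma foldRange_names {γ : Type} (xs : List String) (f : γ → String → γ) (init : γ) :
    (PySem.List.pyRange 0 (PySem.List.len xs) 1).foldl
      (fun acc i => f acc (PySem.List.pyGetD xs i "")) init = xs.foldl f init := by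
  simpa using PySem.List.foldl_pyRange_pyGetD xs "" f init (a := 0) (by norm_num)

lemma foldRange_zip_aux (xs ys : List String) :
    ∀ (n : Nat) (init : PySem.Dict String (List String) × PySem.Dict String (PySem.Dict String Int) × List String),
      n ≤ xs.length → n ≤ ys.length →
    (List.range n).foldl (fun st k => haStep0 st xs[k]? ys[k]?) init
      = ((xs.zip ys).take n).foldl haStep1 init := by
  intro n
  induction n with
  | zero => intro init _ _; simp
  | succ n ih =>
    intro init h1 h2
    have hx : xs[n]? = some xs[n] := List.getElem?_eq_getElem (by omega)
    have hy : ys[n]? = some ys[n] := List.getElem?_eq_getElem (by omega)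
    have hz : n < (xs.zip ys).length := by
      rw [List.length_zip]; omega
    have hzip : (xs.zip ys)[n]? = some (xs[n], ys[n]) := by
      rw [List.getElem?_eq_getElem hz]
      exact congrArg some List.getElem_zip
    rw [List.range_succ, List.foldl_append, ih init (by omega) (by omega),
        List.take_add_one, hzip]
    simp [hx, hy, haStep0]

lemma phase1_eq_zip (sl ul : List String) (h : sl.length ≤ ul.length) :
    haPhase1 sl ul = (sl.zip ul).foldl haStep1 (PySem.Dict.empty, PySem.Dict.empty, []) := by
  unfold haPhase1
  rw [PySem.List.len_eq, PySem.List.pyRange_zero_nat, List.foldl_map]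
  simp only [PySem.List.pyGet?_natCast]
  rw [foldRange_zip_aux sl ul sl.length (PySem.Dict.empty, PySem.Dict.empty, []) (le_refl _) h]
  congr 1
  apply List.take_of_length_le
  rw [List.length_zip]; omega

lemma step1_inv (l : List (String × String)) :
    (l.foldl haStep1 (PySem.Dict.empty, PySem.Dict.empty, [])).2.2
        = PySem.Set.ofList (l.map Prod.fst)
    ∧ (∀ s, (l.foldl haStep1 (PySem.Dict.empty, PySem.Dict.empty, [])).1.contains s
        = (l.map Prod.fst).contains s)
    ∧ (∀ s, (l.foldl haStep1 (PySem.Dict.empty, PySem.Dict.empty, [])).1.getD s [] = uOf l s)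
    ∧ (∀ x, (l.foldl haStep1 (PySem.Dict.empty, PySem.Dict.empty, [])).2.1.getD x PySem.Dict.empty
        = PySem.Dict.empty) := by
  induction l using List.reverseRecOn with
  | nil =>
    refine ⟨rfl, ?_, ?_, ?_⟩ <;> intro s <;>
      simp [uOf, PySem.Dict.contains_empty, PySem.Dict.getD_empty]
  | append_singleton t p ih =>
    obtain ⟨ih1, ih2, ih3, ih4⟩ := ih
    simp only [List.foldl_append, List.foldl_cons, List.foldl_nil]
    generalize hst : t.foldl haStep1 (PySem.Dict.empty, PySem.Dict.empty, []) = st at *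
    by_cases hp : p.1 ∈ t.map Prod.fst
    · have hc : st.1.contains p.1 = true := by rw [ih2]; simpa using hp
      simp only [haStep1, hc, Bool.not_true, Bool.false_eq_true, if_false]
      refine ⟨?_, ?_, ?_, ?_⟩
      · rw [ih1, List.map_append, List.map_cons, List.map_nil, PySem.Set.ofList_append_singleton,
            PySem.Set.add_of_mem ((PySem.Set.mem_ofList _ _).mpr hp)]
      · intro s
        rw [PySem.Dict.contains_modify, ih2, List.map_append, List.map_cons, List.map_nil]
        cases h : (s == p.1) with
        | false =>
          simp only [beq_eq_false_iff_ne, ne_eq] at h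
          simp [h, List.mem_append]
        | true =>
          simp only [beq_iff_eq] at h
          simp [h, List.mem_append]
      · intro s
        rw [PySem.Dict.getD_modify, ih3, uOf_append]
        by_cases hs : s = p.1
        · subst hs; simp
        · have hb : (p.1 == s) = false := by
            simp only [beq_eq_false_iff_ne, ne_eq]
            exact fun hh => hs hh.symm
          simp [hs, hb, ih3]
      · exact ih4
    · have hc : st.1.contains p.1 = false := by rw [ih2]; simpa using hp
      simp only [haStep1, hc, Bool.not_false, if_true]
      refine ⟨?_, ?_, ?_, ?_⟩
      · rw [ih1, List.map_append, List.map_cons, List.map_nil, PySem.Set.ofList_append_singleton,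
            PySem.Set.add_of_not_mem (fun hm => hp ((PySem.Set.mem_ofList _ _).mp hm))]
      · intro s
        rw [PySem.Dict.contains_insert, ih2, List.map_append, List.map_cons, List.map_nil]
        cases h : (s == p.1) with
        | false =>
          simp only [beq_eq_false_iff_ne, ne_eq] at h
          simp [h, List.mem_append]
        | true =>
          simp only [beq_iff_eq] at h
          simp [h, List.mem_append]
      · intro s
        rw [PySem.Dict.getD_insert, ih3, uOf_append]
        by_cases hs : s = p.1
        · subst hs
          simp [uOf_nil_of_not_mem t p.1 hp]
        · have hb : (p.1 == s) = false := by
            simp only [beq_eq_false_iff_ne, ne_eq]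
            exact fun hh => hs hh.symm
          simp [hs, hb]
      · intro x
        rw [PySem.Dict.getD_insert]
        by_cases hx : x = p.1
        · simp [hx]
        · simp [hx, ih4 x]

lemma count_eq_refC (l : List (String × String)) (d1 : PySem.Dict String (List String))
    (hd : ∀ s, d1.getD s [] = uOf l s) (a b : String) : haCount d1 a b = refC l a b := by
  unfold haCount refC
  rw [hd a, hd b, PySem.List.foldl_if_add_one]
  simp only [zero_add]

lemma inner3_ne (names : List String) (c : String → String → Int) (x z : String)
    (hz : z ≠ x) (d2 : PySem.Dict String (PySem.Dict String Int)) :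
    (names.foldl (fun d2 y =>
        if x ≠ y then d2.insert x ((d2.getD x PySem.Dict.empty).insert y (c x y)) else d2)
      d2).getD z PySem.Dict.empty = d2.getD z PySem.Dict.empty := by
  induction names generalizing d2 with
  | nil => rfl
  | cons y t ih =>
    rw [List.foldl_cons, ih]
    by_cases h : x = y
    · rw [if_neg (not_not_intro h)]
    · rw [if_pos h, PySem.Dict.getD_insert, if_neg hz]

lemma inner3_row (names : List String) (c : String → String → Int) (x b : String)
    (hbx : b ≠ x) :
    ∀ d2 : PySem.Dict String (PySem.Dict String Int),
    ((names.foldl (fun d2 y =>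
        if x ≠ y then d2.insert x ((d2.getD x PySem.Dict.empty).insert y (c x y)) else d2)
      d2).getD x PySem.Dict.empty).getD b 0
      = if b ∈ names then c x b else (d2.getD x PySem.Dict.empty).getD b 0 := by
  induction names using List.reverseRecOn with
  | nil => intro d2; simp
  | append_singleton t y ih =>
    intro d2
    rw [List.foldl_append, List.foldl_cons, List.foldl_nil]
    by_cases hxy : x = y
    · rw [if_neg (not_not_intro hxy), ih d2]
      have hby : b ≠ y := fun hh => hbx (hh.trans hxy.symm)
      simp [List.mem_append, hby]
    · rw [if_pos hxy, PySem.Dict.getD_insert, if_pos rfl, PySem.Dict.getD_insert]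
      by_cases hby : b = y
      · subst hby
        rw [if_pos rfl]
        simp [List.mem_append]
      · rw [if_neg hby, ih d2]
        simp [List.mem_append, hby]

lemma outer3 (names : List String) (c : String → String → Int)
    (l : List String) (d2 : PySem.Dict String (PySem.Dict String Int)) (a b : String)
    (ha : a ∈ l) (hb : b ∈ names) (hab : a ≠ b) :
    ((l.foldl (fun d2 x =>
        names.foldl (fun d2 y =>
          if x ≠ y then d2.insert x ((d2.getD x PySem.Dict.empty).insert y (c x y)) else d2) d2)
      d2).getD a PySem.Dict.empty).getD b 0 = c a b := by
  induction l using List.reverseRecOn generalizing d2 with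
  | nil => cases ha
  | append_singleton t x ih =>
    rw [List.foldl_append, List.foldl_cons, List.foldl_nil]
    by_cases hax : a = x
    · subst hax
      rw [inner3_row names c a b (Ne.symm hab) _]
      simp [hb]
    · rw [inner3_ne names c x a hax _]
      have ha' : a ∈ t := by
        rcases List.mem_append.mp ha with h | h
        · exact h
        · exact absurd (by simpa using h) hax
      exact ih d2 ha'

lemma phase3_getD (names : List String) (c : String → String → Int)
    (d2 : PySem.Dict String (PySem.Dict String Int)) (a b : String)
    (ha : a ∈ names) (hb : b ∈ names) (hab : a ≠ b) :
    ((names.foldl (fun d2 x =>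
        names.foldl (fun d2 y =>
          if x ≠ y then d2.insert x ((d2.getD x PySem.Dict.empty).insert y (c x y)) else d2) d2)
      d2).getD a PySem.Dict.empty).getD b 0 = c a b :=
  outer3 names c names d2 a b ha hb hab

lemma phase3_eq_fold (d1 : PySem.Dict String (List String)) (names : List String)
    (d2 : PySem.Dict String (PySem.Dict String Int)) :
    haPhase3 d1 names d2 = names.foldl (fun d2 x =>
      names.foldl (fun d2 y =>
        if x ≠ y then d2.insert x ((d2.getD x PySem.Dict.empty).insert y (haCount d1 x y)) else d2)
        d2) d2 := by
  unfold haPhase3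
  rw [foldRange_names names (fun d2 ni =>
      (PySem.List.pyRange 0 (PySem.List.len names) 1).foldl (fun d2 k =>
        if ni ≠ PySem.List.pyGetD names k "" then
          d2.insert ni ((d2.getD ni PySem.Dict.empty).insert (PySem.List.pyGetD names k "")
            (haCount d1 ni (PySem.List.pyGetD names k "")))
        else d2) d2) d2]
  apply PySem.List.foldl_congr_mem'
  intro x _ acc
  rw [foldRange_names names (fun d2 nk =>
      if x ≠ nk then d2.insert x ((d2.getD x PySem.Dict.empty).insert nk (haCount d1 x nk))
      else d2) acc]

lemma phase4_eq_scan (names : List String) (d2 : PySem.Dict String (PySem.Dict String Int))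
    (c : String → String → Int)
    (h : ∀ a ∈ names, ∀ b ∈ names, a ≠ b → (d2.getD a PySem.Dict.empty).getD b 0 = c a b) :
    haPhase4 names d2 = haScan names c := by
  unfold haPhase4 haScan
  rw [foldRange_names names (fun st ni =>
      (PySem.List.pyRange 0 (PySem.List.len names) 1).foldl (fun (st : String × String × Int) j =>
        if ni ≠ PySem.List.pyGetD names j "" then
          if (d2.getD ni PySem.Dict.empty).getD (PySem.List.pyGetD names j "") 0 > st.2.2 then
            (ni, PySem.List.pyGetD names j "",
              (d2.getD ni PySem.Dict.empty).getD (PySem.List.pyGetD names j "") 0)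
          else st
        else st) st) ("", "", (0 : Int))]
  apply PySem.List.foldl_congr_mem'
  intro a ha st
  rw [foldRange_names names (fun (st : String × String × Int) nj =>
      if a ≠ nj then
        if (d2.getD a PySem.Dict.empty).getD nj 0 > st.2.2 then
          (a, nj, (d2.getD a PySem.Dict.empty).getD nj 0)
        else st
      else st) st]
  apply PySem.List.foldl_congr_mem'
  intro b hb st'
  by_cases hab : a = b
  · simp [hab]
  · rw [if_pos hab, if_pos hab, h a ha b hb hab]

lemma a_eq_scan (sl ul : List String) (tl : List Int) (h : sl.length ≤ ul.length) :
    highest_affinity sl ul tl =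
      (let best := haScan (PySem.Set.ofList ((sl.zip ul).map Prod.fst)) (refC (sl.zip ul))
       let fl := PySem.List.sorted [best.1, best.2.1] (fun x => x) false
       (PySem.List.pyGetD fl 0 "", PySem.List.pyGetD fl 1 "")) := by
  have hz := phase1_eq_zip sl ul h
  obtain ⟨h1, h2, h3, h4⟩ := step1_inv (sl.zip ul)
  simp only [highest_affinity, hz, h1, phase3_eq_fold]
  rw [phase4_eq_scan _ _ (refC (sl.zip ul))
    (fun a ha b hb hab =>
      (phase3_getD _ _ _ a b ha hb hab).trans
        (count_eq_refC (sl.zip ul) _ h3 a b))]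

-- ===== B-side lemmas =====

-- pass-1 invariant: order = seen = first-appearance site list; sites_of[u] is the
-- duplicate-free list of sites whose zipped occurrences carry user u
lemma pass1_inv (l : List (String × String)) :
    (hbPass1 l).1 = PySem.Set.ofList (l.map Prod.fst)
    ∧ (hbPass1 l).2.1 = PySem.Set.ofList (l.map Prod.fst)
    ∧ (∀ u t, t ∈ (hbPass1 l).2.2.getD u [] ↔ (t, u) ∈ l)
    ∧ (∀ u, ((hbPass1 l).2.2.getD u []).Nodup) := by
  unfold hbPass1
  induction l using List.reverseRecOn with
  | nil =>
    refine ⟨rfl, rfl, ?_, ?_⟩ <;> intro u <;>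
      simp [PySem.Dict.getD_empty]
  | append_singleton t p ih =>
    obtain ⟨ps, pu⟩ := p
    obtain ⟨ih1, ih2, ih3, ih4⟩ := ih
    simp only [List.foldl_append, List.foldl_cons, List.foldl_nil]
    generalize hst : t.foldl hbPass1Step ([], PySem.Set.empty, PySem.Dict.empty) = st at *
    -- the order/seen components after the step
    have horder : (hbPass1Step st (ps, pu)).1 = PySem.Set.ofList ((t ++ [(ps, pu)]).map Prod.fst)
        ∧ (hbPass1Step st (ps, pu)).2.1 = PySem.Set.ofList ((t ++ [(ps, pu)]).map Prod.fst) := by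
      rw [List.map_append, List.map_cons, List.map_nil, PySem.Set.ofList_append_singleton]
      by_cases hp : ps ∈ t.map Prod.fst
      · have hc : PySem.Set.contains st.2.1 ps = true := by
          rw [ih2]
          simpa [PySem.Set.contains] using (PySem.Set.mem_ofList _ _).mpr hp
        simp only [hbPass1Step, hc, Bool.not_true, Bool.false_eq_true, if_false]
        exact ⟨by rw [ih1, PySem.Set.add_of_mem ((PySem.Set.mem_ofList _ _).mpr hp)],
               by rw [ih2, PySem.Set.add_of_mem ((PySem.Set.mem_ofList _ _).mpr hp)]⟩
      · have hc : PySem.Set.contains st.2.1 ps = false := by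
          rw [ih2]
          simpa [PySem.Set.contains] using
            (fun hm => hp ((PySem.Set.mem_ofList _ _).mp hm) : ps ∉ PySem.Set.ofList (t.map Prod.fst))
        have hpm : ps ∉ PySem.Set.ofList (t.map Prod.fst) :=
          fun hm => hp ((PySem.Set.mem_ofList _ _).mp hm)
        simp only [hbPass1Step, hc, Bool.not_false, if_true]
        exact ⟨by rw [ih1, PySem.Set.add_of_not_mem hpm],
               by rw [ih2, PySem.Set.add_of_not_mem hpm]⟩
    -- the sites_of component after the step (the seen-branch does not touch it)
    have hsites : (hbPass1Step st (ps, pu)).2.2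
        = st.2.2.insert pu (if (st.2.2.getD pu []).contains ps then st.2.2.getD pu []
                             else st.2.2.getD pu [] ++ [ps]) := by
      unfold hbPass1Step
      by_cases hc : PySem.Set.contains st.2.1 ps = true
      · simp only [hc, Bool.not_true, Bool.false_eq_true, if_false]
      · have hc' : PySem.Set.contains st.2.1 ps = false := by simpa using hc
        simp only [hc', Bool.not_false, if_true]
    -- membership in the (possibly extended) site list of pu
    have hnew : ∀ x, (x ∈ (if (st.2.2.getD pu []).contains ps then st.2.2.getD pu []
                           else st.2.2.getD pu [] ++ [ps]))
        ↔ (x ∈ st.2.2.getD pu [] ∨ x = ps) := by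
      intro x
      by_cases hm : ps ∈ st.2.2.getD pu []
      · have hcb : (st.2.2.getD pu []).contains ps = true := by simpa using hm
        rw [if_pos hcb]
        constructor
        · exact Or.inl
        · rintro (h | h)
          · exact h
          · exact h ▸ hm
      · have hcb : (st.2.2.getD pu []).contains ps = false := by simpa using hm
        rw [hcb]
        simp
    refine ⟨horder.1, horder.2, ?_, ?_⟩
    · intro u x
      rw [hsites, PySem.Dict.getD_insert]
      by_cases hu : u = pu
      · subst hu
        rw [if_pos rfl, hnew, ih3]
        simp [List.mem_append]
      · rw [if_neg hu, ih3]
        constructor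
        · intro h; exact List.mem_append.mpr (Or.inl h)
        · intro h
          rcases List.mem_append.mp h with h | h
          · exact h
          · have hx : (x, u) = (ps, pu) := by simpa using h
            exact absurd (congrArg Prod.snd hx) hu
    · intro u
      rw [hsites, PySem.Dict.getD_insert]
      by_cases hu : u = pu
      · subst hu
        rw [if_pos rfl]
        by_cases hm : ps ∈ st.2.2.getD u []
        · have hcb : (st.2.2.getD u []).contains ps = true := by simpa using hm
          rw [if_pos hcb]
          exact ih4 u
        · have hcb : (st.2.2.getD u []).contains ps = false := by simpa using hm
          rw [hcb]
          simp only [Bool.false_eq_true, if_false]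
          exact List.Nodup.append (ih4 u) (List.nodup_singleton _)
            (by simpa [List.disjoint_singleton] using hm)
      · simpa [hu] using ih4 u

-- the inner accumulation over one occurrence's site list (duplicate-free)
lemma hb_inner (ts : List String) (hnd : ts.Nodup) (s a b : String) (hab : a ≠ b)
    (sc : PySem.Dict (String × String) Int) :
    (ts.foldl (fun sc t => if t ≠ s then sc.modify (s, t) 0 (· + 1) else sc) sc).getD (a, b) 0
      = sc.getD (a, b) 0 + (if a = s ∧ b ∈ ts then 1 else 0) := by
  induction ts using List.reverseRecOn with
  | nil => simp
  | append_singleton t0s t0 ih =>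
    have hnd' : t0s.Nodup := (List.nodup_append.mp hnd).1
    have ht0 : t0 ∉ t0s := fun hm => (List.nodup_append.mp hnd).2.2 t0 hm t0 (by simp) rfl
    rw [List.foldl_append, List.foldl_cons, List.foldl_nil]
    by_cases h0 : t0 = s
    · rw [if_neg (not_not_intro h0), ih hnd']
      congr 1
      by_cases has : a = s
      · have hbs : b ≠ s := fun hh => hab (has.trans hh.symm)
        have : b ∈ t0s ++ [t0] ↔ b ∈ t0s := by
          simp [h0, hbs]
        simp [this]
      · simp [has]
    · rw [if_pos h0, PySem.Dict.getD_modify]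
      by_cases hk : (a, b) = (s, t0)
      · rw [Prod.mk.injEq] at hk
        obtain ⟨has, hbt⟩ := hk
        subst has; subst hbt
        rw [if_pos rfl, ih hnd']
        simp [ht0]
      · rw [if_neg hk, ih hnd']
        congr 1
        have hsplit : ¬ (a = s ∧ b = t0) := fun ⟨h1, h2⟩ => hk (by rw [h1, h2])
        by_cases has : a = s
        · have hbt : b ≠ t0 := fun hh => hsplit ⟨has, hh⟩
          have : b ∈ t0s ++ [t0] ↔ b ∈ t0s := by simp [hbt]
          simp [this]
        · simp [has]

-- pass-2 characterisation: the accumulated score of an ordered pair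
lemma pass2_getD (F : PySem.Dict String (List String))
    (hnd : ∀ u, (F.getD u []).Nodup) (z : List (String × String)) (a b : String) (hab : a ≠ b) :
    (hbPass2 z F).getD (a, b) 0
      = ((z.countP (fun p => p.1 == a && (F.getD p.2 []).contains b) : Nat) : Int) := by
  unfold hbPass2
  induction z using List.reverseRecOn with
  | nil => simp [PySem.Dict.getD_empty]
  | append_singleton t p ih =>
    rw [List.foldl_append, List.foldl_cons, List.foldl_nil,
        hb_inner (F.getD p.2 []) (hnd p.2) p.1 a b hab, ih, List.countP_append,
        List.countP_cons, List.countP_nil]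
    have hcond : (if a = p.1 ∧ b ∈ F.getD p.2 [] then (1 : Int) else 0)
        = (((if (p.1 == a && (F.getD p.2 []).contains b) = true then 1 else 0 : Nat)) : Int) := by
      by_cases hpa : p.1 = a
      · by_cases hbm : b ∈ F.getD p.2 []
        · simp [hpa, hbm]
        · simp [hpa, hbm]
      · have hap : ¬ a = p.1 := fun h => hpa h.symm
        simp [hap, hpa]
    rw [hcond]
    push_cast
    ring

-- the occurrence count rewritten as A's reference score
lemma countP_eq_refC (z : List (String × String)) (F : PySem.Dict String (List String))
    (hF : ∀ u t, t ∈ F.getD u [] ↔ (t, u) ∈ z) (a b : String) :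
    ((z.countP (fun p => p.1 == a && (F.getD p.2 []).contains b) : Nat) : Int) = refC z a b := by
  unfold refC
  congr 1
  have h1 : ∀ p : String × String,
      (F.getD p.2 []).contains b = (uOf z b).contains p.2 := by
    intro p
    have : b ∈ F.getD p.2 [] ↔ p.2 ∈ uOf z b := by
      rw [hF p.2 b, mem_uOf]
    by_cases h : b ∈ F.getD p.2 []
    · simp [h, this.mp h]
    · have : p.2 ∉ uOf z b := fun hm => h (this.mpr hm)
      simp_all
  calc z.countP (fun p => p.1 == a && (F.getD p.2 []).contains b)
      = z.countP (fun p => p.1 == a && (uOf z b).contains p.2) := by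
        apply List.countP_congr
        intro p _
        rw [h1 p]
    _ = (uOf z a).countP (fun u => (uOf z b).contains u) := by
        unfold uOf
        rw [List.countP_map, List.countP_filter]
        apply List.countP_congr
        intro p _
        simp [Function.comp, Bool.and_comm]

-- B's combined scan equals the common scan shape
lemma alt_scan (order : List String) (score : PySem.Dict (String × String) Int)
    (c : String → String → Int)
    (h : ∀ a b, a ≠ b → score.getD (a, b) 0 = c a b) :
    order.foldl (fun st a =>
      order.foldl (fun (st : String × String × Int) b =>
        if a ≠ b ∧ score.getD (a, b) 0 > st.2.2 then (a, b, score.getD (a, b) 0) else st) st)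
      ("", "", (0 : Int)) = haScan order c := by
  unfold haScan
  apply PySem.List.foldl_congr_mem'
  intro a _ st
  apply PySem.List.foldl_congr_mem'
  intro b _ st'
  by_cases hab : a = b
  · simp [hab]
  · rw [h a b hab]
    by_cases hgt : c a b > st'.2.2
    · rw [if_pos ⟨hab, hgt⟩, if_pos hab, if_pos hgt]
    · rw [if_neg (fun hh => hgt hh.2), if_pos hab, if_neg hgt]

lemma alt_eq_scan (sl ul : List String) (tl : List Int) :
    highest_affinity_alt sl ul tl =
      (let best := haScan (PySem.Set.ofList ((sl.zip ul).map Prod.fst)) (refC (sl.zip ul))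
       let fl := PySem.List.sorted [best.1, best.2.1] (fun x => x) false
       (PySem.List.pyGetD fl 0 "", PySem.List.pyGetD fl 1 "")) := by
  obtain ⟨h1, _h2, h3, h4⟩ := pass1_inv (sl.zip ul)
  simp only [highest_affinity_alt]
  rw [h1, alt_scan _ _ (refC (sl.zip ul))
    (fun a b hab =>
      (pass2_getD _ h4 (sl.zip ul) a b hab).trans
        (countP_eq_refC (sl.zip ul) _ h3 a b))]

-- ===== VERDICT (by name: the statement is the Claim_ definition above) =====
theorem highest_affinity_spec : Claim_equal_highest_affinity := by
  intro sl ul tl _hdom hpre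
  unfold Spec_highest_affinity
  rw [a_eq_scan sl ul tl hpre, alt_eq_scan sl ul tl]
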